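-- pv_equiv track=rewrite | github.com/soogineer/study-algorithms | thisiscodingtest/배열의원소교체.py | solution
-- ===== SOURCE A (Python) =====
-- def solution(n, k, arr_a, arr_b):
--     answer = 0
--     arr_a.sort()
--     arr_b.sort(reverse=True)
--
--     for i in range(k):
--         if arr_a[i] < arr_b[i]:
--           arr_a[i], arr_b[i] = arr_b[i], arr_a[i]
--         else:
--           break
--     answer = sum(arr_a)
--     return answer
-- ===== SOURCE B (Python) =====
-- def solution(n, k, arr_a, arr_b):
--     # B: sort once, then binary-search the length t of the beneficial prefix
--     # (gains sb[i]-sa[i] are nonincreasing because sa is ascending and sb is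
--     # descending), and return sum(sb[:t]) + sum(sa[t:]) directly.
--     # Unlike A, B does not mutate its argument lists.
--     sa = sorted(arr_a)
--     sb = sorted(arr_b, reverse=True)
--     lo, hi = 0, min(k, len(sa), len(sb))
--     while lo < hi:
--         mid = (lo + hi) // 2
--         if sa[mid] < sb[mid]:
--             lo = mid + 1
--         else:
--             hi = mid
--     return sum(sb[:lo]) + sum(sa[lo:])
-- ===== Notes on version B (the rewrite author's own statement) =====
-- stated objective: alternative
-- what changed: Instead of walking the two sorted arrays and swapping elements in place until the first non-beneficial pair, B binary-searches the length t of the beneficial prefix (the gains sb[i]-sa[i] are nonincreasing) and returns sum(sb[:t]) + sum(sa[t:]) directly, mutating nothing.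
import Mathlib
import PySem

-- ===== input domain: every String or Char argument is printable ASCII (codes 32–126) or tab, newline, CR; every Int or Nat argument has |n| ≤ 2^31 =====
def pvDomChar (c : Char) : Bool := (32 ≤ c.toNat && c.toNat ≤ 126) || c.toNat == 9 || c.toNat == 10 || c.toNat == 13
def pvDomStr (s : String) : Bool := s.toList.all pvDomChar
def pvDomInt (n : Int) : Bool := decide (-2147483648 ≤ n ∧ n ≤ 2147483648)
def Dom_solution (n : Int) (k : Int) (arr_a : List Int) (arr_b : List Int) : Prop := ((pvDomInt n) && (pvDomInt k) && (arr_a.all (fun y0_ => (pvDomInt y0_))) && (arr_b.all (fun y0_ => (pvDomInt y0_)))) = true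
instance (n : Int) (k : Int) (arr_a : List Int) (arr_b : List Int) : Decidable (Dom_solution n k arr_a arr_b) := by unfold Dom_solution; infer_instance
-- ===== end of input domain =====

-- B replaces A's in-place swap loop (linear scan with break over the two sorted arrays)
-- by a binary search for the length t of the beneficial prefix (the gains sb[i]-sa[i]
-- are nonincreasing), returning sum(sb[:t]) + sum(sa[t:]) directly.
-- A sorts arr_a and arr_b IN PLACE (observable by the caller); B mutates nothing —
-- the equivalence proved here is about the RETURN value only.


-- ===== PORT A =====
-- the 'for i in range(k)' loop: swap arr_a[i], arr_b[i] while arr_a[i] < arr_b[i], else break.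
-- The '(a, b)' result on an out-of-range index is never reached under Pre_solution
-- (in Python that index raises IndexError).
def solLoopA (idxs : List Int) (a b : List Int) : List Int × List Int :=
  match idxs with
  | [] => (a, b)
  | i :: rest =>
    match PySem.List.pyGet? a i, PySem.List.pyGet? b i with
    | some x, some y =>
      if x < y then
        solLoopA rest (PySem.List.pySetD a i y) (PySem.List.pySetD b i x)
      else (a, b)          -- break
    | _, _ => (a, b)       -- IndexError in Python; excluded by Pre_solution

def solution (n : Int) (k : Int) (arr_a : List Int) (arr_b : List Int) : Int :=
  let a := PySem.List.sorted arr_a (fun x => x) false          -- arr_a.sort()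
  let b := PySem.List.sorted arr_b (fun x => x) true           -- arr_b.sort(reverse=True)
  let ab := solLoopA (PySem.List.pyRange 0 k 1) a b
  ab.1.sum                                                     -- answer = sum(arr_a)

-- ===== PORT B =====
-- midpoint bounds for the binary search (cited by bsearch's decreasing_by)
theorem bsearch_mid_lt (lo hi : Int) (h : lo < hi) :
    lo ≤ PySem.Int.floordiv (lo + hi) 2 ∧ PySem.Int.floordiv (lo + hi) 2 < hi := by
  obtain ⟨h1, _⟩ := PySem.Int.floordiv_two_mid_bounds (le_of_lt h)
  refine ⟨h1, ?_⟩
  rw [PySem.Int.floordiv_lt_iff_lt_mul (by omega : (0:Int) < 2)]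
  omega

-- the 'while lo < hi' binary search of Source B; the '| _, _ => lo' branch is an
-- out-of-range index (IndexError in Python), never reached by solution_alt's call
-- since there 0 ≤ lo and hi ≤ both lengths.
def bsearch (sa sb : List Int) (lo hi : Int) : Int :=
  if h : lo < hi then
    let mid := PySem.Int.floordiv (lo + hi) 2
    match PySem.List.pyGet? sa mid, PySem.List.pyGet? sb mid with
    | some x, some y =>
      if x < y then bsearch sa sb (mid + 1) hi else bsearch sa sb lo mid
    | _, _ => lo
  else lo
termination_by (hi - lo).toNat
decreasing_by
  · have := bsearch_mid_lt lo hi h; omega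
  · have := bsearch_mid_lt lo hi h; omega

def solution_alt (n : Int) (k : Int) (arr_a : List Int) (arr_b : List Int) : Int :=
  let sa := PySem.List.sorted arr_a (fun x => x) false
  let sb := PySem.List.sorted arr_b (fun x => x) true
  let lo := bsearch sa sb 0 (min (min k (sa.length : Int)) (sb.length : Int))
  (PySem.List.slice sb none (some lo)).sum + (PySem.List.slice sa (some lo) none).sum

-- ===== PRECONDITION & SPEC =====
-- Pre_solution is EXACTLY the set of inputs on which the Python A returns: outside it
-- (k exceeds min(len(arr_a), len(arr_b)) and every pair of the first min-length sorted
-- positions would still be swapped) A's arr_a[i] raises IndexError.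
def Pre_solution (n : Int) (k : Int) (arr_a : List Int) (arr_b : List Int) : Prop :=
  k ≤ (min arr_a.length arr_b.length : Nat) ∨
  ∃ i : Nat, i < min arr_a.length arr_b.length ∧
    (PySem.List.sorted arr_b (fun x => x) true).getD i 0
      ≤ (PySem.List.sorted arr_a (fun x => x) false).getD i 0
instance (n : Int) (k : Int) (arr_a : List Int) (arr_b : List Int) : Decidable (Pre_solution n k arr_a arr_b) := by unfold Pre_solution; infer_instance

def pvWitness_solution : Int × Int × List Int × List Int := (3, 2, [1, 5, 4], [3, 3, 2])

def Spec_solution (n : Int) (k : Int) (arr_a : List Int) (arr_b : List Int) (out : Int) : Prop := out = solution_alt n k arr_a arr_b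
instance (n : Int) (k : Int) (arr_a : List Int) (arr_b : List Int) (out : Int) : Decidable (Spec_solution n k arr_a arr_b out) := by unfold Spec_solution; infer_instance

-- ===== CLAIM (what is proved, stated in full; the proofs are below) =====
def Claim_equal_solution : Prop := ∀ (n : Int) (k : Int) (arr_a : List Int) (arr_b : List Int), Dom_solution n k arr_a arr_b → Pre_solution n k arr_a arr_b → Spec_solution n k arr_a arr_b (solution n k arr_a arr_b)

-- ===== LEMMAS AND PROOFS =====

-- proof-only helper: the value A's swap loop adds, as a fold over zipped pairs
def gainLoop (pairs : List (Int × Int)) (total : Int) : Int :=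
  match pairs with
  | [] => total
  | (x, y) :: rest => if x < y then gainLoop rest (total + (y - x)) else total

theorem take_zip_eq {α β : Type} (l : List α) (l' : List β) (n : Nat) :
    (l.zip l').take n = (l.take n).zip (l'.take n) := by
  induction l generalizing l' n with
  | nil => simp
  | cons x xs ih =>
    cases l' with
    | nil => simp
    | cons y ys =>
      cases n with
      | zero => simp
      | succ m => simp [ih]

-- A's loop on indices j, j+1, … of in-place lists a, b equals gainLoop over the zipped
-- suffix, provided the loop never runs off the end (enough indices, or an early break).
theorem solLoopA_sum (c : Nat) : ∀ (j : Nat) (a b : List Int),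
    (c ≤ ((a.drop j).zip (b.drop j)).length ∨ ∃ p ∈ (a.drop j).zip (b.drop j), ¬ p.1 < p.2) →
    (solLoopA (PySem.List.pyRange (j : Int) ((j : Int) + (c : Int)) 1) a b).1.sum
      = gainLoop (((a.drop j).zip (b.drop j)).take c) a.sum := by
  induction c with
  | zero =>
    intro j a b _
    simp [PySem.List.pyRange_one_eq_nil (by omega : ((j : Int) + (0 : Nat) ≤ j)), solLoopA,
      gainLoop]
  | succ c ih =>
    intro j a b H
    have hlen : ((a.drop j).zip (b.drop j)).length = min (a.length - j) (b.length - j) := by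
      simp
    have hja : j < a.length ∧ j < b.length := by
      rcases H with hc | ⟨p, hp, _⟩
      · omega
      · have : 0 < ((a.drop j).zip (b.drop j)).length := List.length_pos_of_mem hp
        omega
    obtain ⟨hja, hjb⟩ := hja
    rw [PySem.List.pyRange_one_cons (by push_cast; omega)]
    rw [List.drop_eq_getElem_cons hja, List.drop_eq_getElem_cons hjb] at H ⊢
    simp only [solLoopA, PySem.List.pyGet?_natCast, List.getElem?_eq_getElem hja,
      List.getElem?_eq_getElem hjb, List.zip_cons_cons, List.take_succ_cons, gainLoop] at H ⊢
    by_cases hlt : a[j] < b[j]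
    · simp only [hlt, if_pos]
      have step : ((j : Int) + 1) = ((j + 1 : Nat) : Int) := by push_cast; ring
      have step2 : (j : Int) + ((c : Nat) + 1 : Nat) = ((j + 1 : Nat) : Int) + (c : Int) := by
        push_cast; ring
      rw [step2, PySem.List.pySetD_natCast, PySem.List.pySetD_natCast, step]
      have hdropa : (a.set j b[j]).drop (j + 1) = a.drop (j + 1) := by
        rw [List.drop_set]; simp
      have hdropb : (b.set j a[j]).drop (j + 1) = b.drop (j + 1) := by
        rw [List.drop_set]; simp
      have H' : c ≤ (((a.set j b[j]).drop (j + 1)).zip ((b.set j a[j]).drop (j + 1))).length ∨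
          ∃ p ∈ ((a.set j b[j]).drop (j + 1)).zip ((b.set j a[j]).drop (j + 1)), ¬ p.1 < p.2 := by
        rw [hdropa, hdropb]
        rcases H with hc | ⟨p, hp, hnp⟩
        · left; simp at hc ⊢; omega
        · right
          rcases List.mem_cons.mp hp with rfl | htail
          · exact absurd hlt hnp
          · exact ⟨p, htail, hnp⟩
      rw [ih (j + 1) (a.set j b[j]) (b.set j a[j]) H']
      have hsum : (a.set j b[j]).sum = a.sum + (b[j] - a[j]) := by
        rw [List.sum_set']
        simp [hja]
        ring
      rw [hdropa, hdropb, hsum]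
    · simp [hlt, solLoopA]

-- gainLoop totals the gains of the beneficial prefix (up to the first non-beneficial pair)
theorem gainLoop_eq (pairs : List (Int × Int)) (total : Int) :
    gainLoop pairs total
      = total + ((pairs.take (pairs.findIdx (fun p => decide (p.2 ≤ p.1)))).map
          (fun p => p.2 - p.1)).sum := by
  induction pairs generalizing total with
  | nil => simp [gainLoop]
  | cons hd rest ih =>
    obtain ⟨x, y⟩ := hd
    by_cases hlt : x < y
    · have hpred : decide ((x, y).2 ≤ (x, y).1) = false := by simp; omega
      rw [List.findIdx_cons, hpred]
      simp only [gainLoop, if_pos hlt, cond_false, List.take_succ_cons, List.map_cons,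
        List.sum_cons, ih]
      ring
    · have hpred : decide ((x, y).2 ≤ (x, y).1) = true := by simp; omega
      rw [List.findIdx_cons, hpred]
      simp [gainLoop, hlt]

theorem sum_map_sub_zip (l1 l2 : List Int) (h : l1.length = l2.length) :
    ((l1.zip l2).map (fun p => p.2 - p.1)).sum = l2.sum - l1.sum := by
  induction l1 generalizing l2 with
  | nil => cases l2 <;> simp at h ⊢
  | cons x xs ih =>
    cases l2 with
    | nil => simp at h
    | cons y ys =>
      simp only [List.length_cons, Nat.succ_inj] at h
      simp [ih ys h]
      ring

-- the binary search returns t when everything left of t is beneficial and everything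
-- in [t, hi0) is not
theorem bsearch_eq (sa sb : List Int) (t : Nat) (hi0 : Int)
    (Hben : ∀ i : Nat, i < t → ∀ (h1 : i < sa.length) (h2 : i < sb.length), sa[i] < sb[i])
    (Hnon : ∀ i : Nat, t ≤ i → (i : Int) < hi0 →
      ∀ (h1 : i < sa.length) (h2 : i < sb.length), sb[i] ≤ sa[i]) :
    ∀ (N : Nat) (lo hi : Int), (hi - lo).toNat ≤ N → 0 ≤ lo →
      hi ≤ hi0 → hi ≤ (sa.length : Int) → hi ≤ (sb.length : Int) →
      lo ≤ (t : Int) → (t : Int) ≤ hi →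
      bsearch sa sb lo hi = t := by
  intro N
  induction N with
  | zero =>
    intro lo hi hfuel hlo hhi0 hla hlb hlot hthi
    rw [bsearch]
    have hlh : ¬ lo < hi := by omega
    rw [dif_neg hlh]
    omega
  | succ N ih =>
    intro lo hi hfuel hlo hhi0 hla hlb hlot hthi
    rw [bsearch]
    by_cases hlh : lo < hi
    · rw [dif_pos hlh]
      obtain ⟨hm1, hm2⟩ := bsearch_mid_lt lo hi hlh
      have h0m : (0:Int) ≤ PySem.Int.floordiv (lo + hi) 2 := le_trans hlo hm1
      have hma : PySem.Int.floordiv (lo + hi) 2 < (sa.length : Int) := lt_of_lt_of_le hm2 hla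
      have hmb : PySem.Int.floordiv (lo + hi) 2 < (sb.length : Int) := lt_of_lt_of_le hm2 hlb
      have hga := PySem.List.pyGet?_eq_some_getElem (xs := sa) h0m hma
      have hgb := PySem.List.pyGet?_eq_some_getElem (xs := sb) h0m hmb
      simp only [hga, hgb]
      by_cases hxy : sa[(PySem.Int.floordiv (lo + hi) 2).toNat] <
          sb[(PySem.Int.floordiv (lo + hi) 2).toNat]
      · rw [if_pos hxy]
        have hmt : (PySem.Int.floordiv (lo + hi) 2).toNat < t := by
          by_contra hc
          exact absurd (Hnon ((PySem.Int.floordiv (lo + hi) 2).toNat) (by omega) (by omega) (by omega) (by omega)) (by omega)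
        exact ih (PySem.Int.floordiv (lo + hi) 2 + 1) hi (by omega) (by omega) hhi0 hla hlb (by omega) hthi
      · rw [if_neg hxy]
        have hmt : t ≤ (PySem.Int.floordiv (lo + hi) 2).toNat := by
          by_contra hc
          exact absurd (Hben ((PySem.Int.floordiv (lo + hi) 2).toNat) (by omega) (by omega) (by omega)) hxy
        exact ih lo (PySem.Int.floordiv (lo + hi) 2) (by omega) hlo (by omega) (by omega) (by omega) hlot (by omega)
    · rw [dif_neg hlh]
      omega

-- sorted ascending: getElem is monotone (restatement of PySem's lemma for id key)
theorem sorted_asc_mono (xs : List Int) (p q : Nat)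
    (hpq : p ≤ q) (hq : q < (PySem.List.sorted xs (fun x => x) false).length) :
    (PySem.List.sorted xs (fun x => x) false)[p]'(by omega)
      ≤ (PySem.List.sorted xs (fun x => x) false)[q] := by
  rcases Nat.lt_or_ge p q with hlt | hge
  · exact (List.pairwise_iff_getElem.mp
      (PySem.List.sorted_pairwise xs (fun x => x))) p q (by omega) hq hlt
  · have : p = q := by omega
    subst this; rfl

-- sorted descending: getElem is antitone
theorem sorted_desc_mono (xs : List Int) (p q : Nat)
    (hpq : p ≤ q) (hq : q < (PySem.List.sorted xs (fun x => x) true).length) :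
    (PySem.List.sorted xs (fun x => x) true)[q]
      ≤ (PySem.List.sorted xs (fun x => x) true)[p]'(by omega) := by
  rcases Nat.lt_or_ge p q with hlt | hge
  · exact (List.pairwise_iff_getElem.mp
      (PySem.List.sorted_pairwise_rev xs (fun x => x))) p q (by omega) hq hlt
  · have : p = q := by omega
    subst this; rfl

-- ===== VERDICT (by name: the statement is the Claim_ definition above) =====
theorem solution_spec : Claim_equal_solution := by
  intro n k arr_a arr_b _ hpre
  simp only [Claim_equal_solution, Spec_solution, solution, solution_alt]
  set sa := PySem.List.sorted arr_a (fun x => x) false with hsa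
  set sb := PySem.List.sorted arr_b (fun x => x) true with hsb
  have hlena : sa.length = arr_a.length := PySem.List.length_sorted _ _ _
  have hlenb : sb.length = arr_b.length := PySem.List.length_sorted _ _ _
  by_cases hk : k ≤ 0
  · rw [PySem.List.pyRange_one_eq_nil hk]
    have hb0 : bsearch sa sb 0 (min (min k (sa.length : Int)) (sb.length : Int)) = 0 := by
      rw [bsearch, dif_neg (by omega)]
    rw [hb0]
    rw [PySem.List.slice_to sb (le_refl (0:Int)), PySem.List.slice_from sa (le_refl (0:Int))]
    simp [solLoopA]
  · push_neg at hk
    unfold Pre_solution at hpre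
    rw [← hsa, ← hsb] at hpre
    set hi0 := min (min k (sa.length : Int)) (sb.length : Int) with hhi0
    set P := (sa.zip sb).take k.toNat with hP
    set N := P.findIdx (fun p => decide (p.2 ≤ p.1)) with hN
    have hzlen : (sa.zip sb).length = min sa.length sb.length := List.length_zip
    have hPlen : P.length = min k.toNat (min sa.length sb.length) := by
      rw [hP, List.length_take, hzlen]
    have hNle : N ≤ P.length := List.findIdx_le_length
    have hNa : N ≤ sa.length := le_trans hNle (by rw [hPlen]; omega)
    have hNb : N ≤ sb.length := le_trans hNle (by rw [hPlen]; omega)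
    have Hben : ∀ i : Nat, i < N → ∀ (h1 : i < sa.length) (h2 : i < sb.length),
        sa[i] < sb[i] := by
      intro i hi h1 h2
      have hiP : i < P.length := by omega
      have h3 := List.not_of_lt_findIdx (p := fun p => decide (p.2 ≤ p.1)) (xs := P) (by omega : i < List.findIdx (fun p => decide (p.2 ≤ p.1)) P)
      simp only [hP, List.getElem_take, List.getElem_zip] at h3
      simpa using h3
    have Hnon : ∀ i : Nat, N ≤ i → (i : Int) < hi0 →
        ∀ (h1 : i < sa.length) (h2 : i < sb.length), sb[i] ≤ sa[i] := by
      intro i hNi hihi h1 h2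
      have hiP : i < P.length := by omega
      have hNP : N < P.length := by omega
      have hpN := List.findIdx_getElem (p := fun p => decide (p.2 ≤ p.1)) (xs := P) (w := hNP)
      simp only [hP, List.getElem_take, List.getElem_zip, decide_eq_true_eq] at hpN
      calc sb[i] ≤ sb[N]'(by omega) := sorted_desc_mono arr_b N i hNi h2
        _ ≤ sa[N]'(by omega) := hpN
        _ ≤ sa[i] := sorted_asc_mono arr_a N i hNi h1
    have hbs : bsearch sa sb 0 hi0 = N := by
      refine bsearch_eq sa sb N hi0 Hben Hnon (hi0 - 0).toNat 0 hi0 (le_refl _)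
        (le_refl _) (le_refl _) (by omega) (by omega) (by omega) (by omega)
    rw [hbs]
    have hkk : ((k.toNat : Nat) : Int) = k := by omega
    have hrange : PySem.List.pyRange 0 k 1
        = PySem.List.pyRange ((0 : Nat) : Int) (((0 : Nat) : Int) + (k.toNat : Int)) 1 := by
      rw [hkk]
      norm_num
    have HH : k.toNat ≤ ((sa.drop 0).zip (sb.drop 0)).length ∨
        ∃ p ∈ (sa.drop 0).zip (sb.drop 0), ¬ p.1 < p.2 := by
      simp only [List.drop_zero, hzlen]
      rcases hpre with hk2 | ⟨i, hiL, hle⟩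
      · left; omega
      · right
        have hiL' : i < (sa.zip sb).length := by rw [List.length_zip]; omega
        refine ⟨(sa.zip sb)[i], List.getElem_mem hiL', ?_⟩
        rw [List.getElem_zip]
        rw [List.getD_eq_getElem sb 0 (by omega), List.getD_eq_getElem sa 0 (by omega)] at hle
        simpa using hle
    have hA := solLoopA_sum k.toNat 0 sa sb HH
    simp only [List.drop_zero] at hA
    rw [hrange, hA, ← hP, gainLoop_eq, ← hN]
    have htt : P.take N = (sa.take N).zip (sb.take N) := by
      rw [hP, List.take_take, Nat.min_eq_left (by rw [hPlen] at hNle; omega : N ≤ k.toNat),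
        take_zip_eq]
    rw [htt, sum_map_sub_zip _ _
      (by simp [Nat.min_eq_left hNa, Nat.min_eq_left hNb])]
    have hsliceb : PySem.List.slice sb none (some (N : Int)) = sb.take N := by
      rw [PySem.List.slice_to sb (by omega : (0:Int) ≤ (N : Int))]
      simp
    have hslicea : PySem.List.slice sa (some (N : Int)) none = sa.drop N := by
      rw [PySem.List.slice_from sa (by omega : (0:Int) ≤ (N : Int))]
      simp
    rw [hsliceb, hslicea]
    have hsum := List.sum_take_add_sum_drop sa N
    linarith [hsum]
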